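-- pv_equiv track=rewrite | github.com/Vuolez/algorithms | Largest palindrome product.py | check_palindrom
-- ===== SOURCE A (Python) =====
-- def check_palindrom(number):
--     number = str(number)
--
--     if len(number) % 2 != 0:
--         return False
--
--     half_len = int(len(number) / 2)
--     for i in range(half_len):
--         if number[i] != number[-(i+1)]:
--             return False
--
--     return True
-- ===== SOURCE B (Python) =====
-- def check_palindrom(number):
--     s = str(number)
--     return len(s) % 2 == 0 and s == s[::-1]
-- ===== Notes on version B (the rewrite author's own statement) =====
-- stated objective: idiomatic
-- what changed: Replaces the index-by-index front/back comparison loop (with early exit) by a single whole-string comparison with the reversed string, keeping the even-length guard.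
import Mathlib
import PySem

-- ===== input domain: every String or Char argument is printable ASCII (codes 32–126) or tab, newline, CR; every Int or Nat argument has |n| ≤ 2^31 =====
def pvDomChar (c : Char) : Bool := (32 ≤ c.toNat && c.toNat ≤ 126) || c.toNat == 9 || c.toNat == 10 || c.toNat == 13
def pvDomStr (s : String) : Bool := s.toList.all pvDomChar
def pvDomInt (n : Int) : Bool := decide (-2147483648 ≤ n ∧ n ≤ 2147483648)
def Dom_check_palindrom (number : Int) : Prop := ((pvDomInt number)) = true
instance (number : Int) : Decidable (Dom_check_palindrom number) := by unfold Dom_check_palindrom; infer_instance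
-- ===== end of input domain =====

-- B replaces A's front/back index loop with early exit by a whole-string comparison
-- against the reversed string, keeping the even-length guard (objective: idiomatic).

-- ===== PORT A =====
-- the for-loop over range(half_len) with early 'return False'
def pvLoopA (s : List Char) : List Int → Bool
  | [] => true
  | i :: rest =>
    if PySem.List.pyGet? s i ≠ PySem.List.pyGet? s (-(i + 1)) then false
    else pvLoopA s rest

def check_palindrom (number : Int) : Bool :=
  let s := PySem.Int.toChars number
  if PySem.Int.mod (PySem.List.len s) 2 ≠ 0 then false
  else
    -- int(len(number) / 2): exact for these (small, nonnegative) lengths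
    pvLoopA s (PySem.List.pyRange 0 (PySem.Int.floordiv (PySem.List.len s) 2) 1)

-- ===== PORT B =====
def check_palindrom_alt (number : Int) : Bool :=
  let s := PySem.Int.toChars number
  -- s == s[::-1]; s[::-1] is List.reverse (PySem.List.slice?_none_none_neg_one)
  (PySem.Int.mod (PySem.List.len s) 2 == 0) && decide (s = s.reverse)

-- ===== PRECONDITION & SPEC =====
def Spec_check_palindrom (number : Int) (out : Bool) : Prop := out = check_palindrom_alt number
instance (number : Int) (out : Bool) : Decidable (Spec_check_palindrom number out) := by unfold Spec_check_palindrom; infer_instance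

-- ===== CLAIM (what is proved, stated in full; the proofs are below) =====
def Claim_equal_check_palindrom : Prop := ∀ (number : Int), Dom_check_palindrom number → Spec_check_palindrom number (check_palindrom number)

-- ===== LEMMAS AND PROOFS =====

lemma pvLoopA_true_iff (s : List Char) (l : List Int) :
    pvLoopA s l = true ↔ ∀ i ∈ l, PySem.List.pyGet? s i = PySem.List.pyGet? s (-(i + 1)) := by
  induction l with
  | nil => simp [pvLoopA]
  | cons i rest ih =>
    by_cases h : PySem.List.pyGet? s i = PySem.List.pyGet? s (-(i + 1)) <;>
      simp [pvLoopA, h, ih]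

-- the half-range check is equivalent to full palindromicity when the length is even
lemma pvHalf_palindrome (s : List Char) (heven : s.length % 2 = 0)
    (h : ∀ j : Nat, j < s.length / 2 → s[j]? = s[s.length - 1 - j]?) :
    s = s.reverse := by
  apply List.ext_getElem?
  intro k
  by_cases hk : k < s.length
  · rw [List.getElem?_reverse hk]
    by_cases hhalf : k < s.length / 2
    · have := h k hhalf
      simpa [List.getElem?_eq_getElem, hk, Nat.lt_of_le_of_lt (Nat.sub_le _ _) hk,
        show s.length - 1 - k < s.length by omega] using this
    · have hk' : s.length - 1 - k < s.length / 2 := by omega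
      have := (h _ hk').symm
      have hidx : s.length - 1 - (s.length - 1 - k) = k := by omega
      rw [hidx] at this
      simpa [List.getElem?_eq_getElem, hk,
        show s.length - 1 - k < s.length by omega] using this
  · rw [List.getElem?_eq_none (by omega), List.getElem?_eq_none (by simp; omega)]

lemma pvRev_half (s : List Char) (j : Nat) (hj : j < s.length / 2) (hrev : s = s.reverse) :
    s[j]? = s[s.length - 1 - j]? := by
  have hk : j < s.length := by omega
  conv_lhs => rw [hrev]
  rw [List.getElem?_reverse hk]

-- ===== VERDICT (by name: the statement is the Claim_ definition above) =====
theorem check_palindrom_spec : Claim_equal_check_palindrom := by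
  intro number _
  unfold Spec_check_palindrom check_palindrom check_palindrom_alt
  set s := PySem.Int.toChars number with hs
  simp only [PySem.List.len_eq]
  have hmod : PySem.Int.mod (s.length : Int) 2 = ((s.length % 2 : Nat) : Int) :=
    PySem.Int.mod_natCast s.length 2
  rw [hmod]
  by_cases heven : s.length % 2 = 0
  · have hzero : ((s.length % 2 : Nat) : Int) = 0 := by omega
    simp only [hzero, ne_eq, not_true_eq_false, if_false, beq_self_eq_true, Bool.true_and]
    have hfd : PySem.Int.floordiv (s.length : Int) 2 = ((s.length / 2 : Nat) : Int) := by
      exact_mod_cast PySem.Int.floordiv_natCast s.length 2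
    rw [hfd]
    rcases Bool.eq_false_or_eq_true (decide (s = s.reverse)) with hdec | hdec
    swap
    · -- not a palindrome: the loop must find a mismatch
      rw [hdec, ← Bool.not_eq_true, pvLoopA_true_iff]
      simp only [decide_eq_false_iff_not] at hdec
      intro hall
      apply hdec
      apply pvHalf_palindrome s heven
      intro j hj
      have hjmem : ((j : Int)) ∈ PySem.List.pyRange 0 ((s.length / 2 : Nat) : Int) 1 := by
        rw [PySem.List.mem_pyRange_one]
        omega
      have := hall _ hjmem
      rw [PySem.List.pyGet?_natCast] at this
      have hneg : -((j : Int) + 1) = -(((j + 1 : Nat) : Int)) := by push_cast; ring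
      rw [hneg, PySem.List.pyGet?_neg_natCast s (j + 1) (by omega) (by omega)] at this
      rw [this]
      congr 1
      omega
    · rw [hdec, pvLoopA_true_iff]
      simp only [decide_eq_true_eq] at hdec
      intro i hi
      rw [PySem.List.mem_pyRange_one] at hi
      have hj : i.toNat < s.length / 2 := by omega
      have hgoal := pvRev_half s i.toNat hj hdec
      have hcast : i = ((i.toNat : Nat) : Int) := by omega
      rw [hcast, PySem.List.pyGet?_natCast]
      have hneg : -(((i.toNat : Nat) : Int) + 1) = -(((i.toNat + 1 : Nat) : Int)) := by
        push_cast; ring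
      rw [hneg, PySem.List.pyGet?_neg_natCast s (i.toNat + 1) (by omega) (by omega)]
      rw [hgoal]
      congr 1
      omega
  · have h1 : s.length % 2 = 1 := by omega
    simp [h1]
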